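-- pv_equiv track=rewrite | github.com/pengyunshan/sword-to-offer | 青蛙跳台阶.py | jumpFloorII
-- ===== SOURCE A (Python) =====
-- def jumpFloorII(number):
--     # write code here
--     util = [0,1,2]
--     if number == 0:
--         return util[0]
--     elif number == 1:
--         return util[1]
--     elif number == 2:
--         return util[2]
--     #当number = 3,4,5,6...时进入下面的for循环
--     for i in range(3,number+1):
--         tmp = 0
--         for j in range(1,i):
--             tmp += util[i-j]
--         util.append(tmp + 1)
--     return util[-1]
-- ===== SOURCE B (Python) =====
-- def jumpFloorII(number):
--     # Closed form: f(0)=0 and f(n)=2^(n-1) for n>=1.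
--     if number == 0:
--         return 0
--     return 1 << (number - 1)
-- ===== Notes on version B (the rewrite author's own statement) =====
-- stated objective: faster
-- what changed: Replaced the quadratic DP table (inner sum over all previous entries) by the closed form 1 << (number-1).
-- outside the precondition, e.g. on jumpFloorII(-1): A returns 2, B raises ValueError
import Mathlib
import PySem

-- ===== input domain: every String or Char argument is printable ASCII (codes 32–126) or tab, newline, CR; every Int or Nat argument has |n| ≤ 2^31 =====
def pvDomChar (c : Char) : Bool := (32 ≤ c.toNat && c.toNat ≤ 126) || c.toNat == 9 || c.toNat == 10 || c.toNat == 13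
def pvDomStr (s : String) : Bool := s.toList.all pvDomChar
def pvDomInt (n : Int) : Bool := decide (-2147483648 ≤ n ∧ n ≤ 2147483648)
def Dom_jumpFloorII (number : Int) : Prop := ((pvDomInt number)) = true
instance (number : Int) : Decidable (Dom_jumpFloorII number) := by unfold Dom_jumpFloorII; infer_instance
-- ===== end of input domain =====

-- B replaces A's quadratic DP table by the closed form 2^(number-1); proved equal for all number ≥ 0.


-- ===== PORT A =====
def jumpFloorII (number : Int) : Int :=
  let util : List Int := [0, 1, 2]
  if number == 0 then PySem.List.pyGetD util 0 0
  else if number == 1 then PySem.List.pyGetD util 1 0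
  else if number == 2 then PySem.List.pyGetD util 2 0
  else
    let util := (PySem.List.pyRange 3 (number + 1) 1).foldl
      (fun util i =>
        let tmp := (PySem.List.pyRange 1 i 1).foldl
          (fun tmp j => tmp + PySem.List.pyGetD util (i - j) 0) 0
        util ++ [tmp + 1]) util
    PySem.List.pyGetD util (-1) 0

-- ===== PORT B =====
def jumpFloorII_alt (number : Int) : Int :=
  if number == 0 then 0
  else 1 <<< (number - 1).toNat   -- 1 << (number - 1); exact for number ≥ 1 (Pre_)

-- ===== PRECONDITION & SPEC =====
-- Pre_ restricts to the function's natural domain, non-negative step counts: on negative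
-- input A returns the last entry of its untouched initial table, a leftover artefact, while B raises ValueError.
def Pre_jumpFloorII (number : Int) : Prop := 0 ≤ number
instance (number : Int) : Decidable (Pre_jumpFloorII number) := by unfold Pre_jumpFloorII; infer_instance
def pvWitness_jumpFloorII : Int := 5

def Spec_jumpFloorII (number : Int) (out : Int) : Prop := out = jumpFloorII_alt number
instance (number : Int) (out : Int) : Decidable (Spec_jumpFloorII number out) := by unfold Spec_jumpFloorII; infer_instance

-- ===== CLAIM (what is proved, stated in full; the proofs are below) =====
def Claim_equal_jumpFloorII : Prop := ∀ (number : Int), Dom_jumpFloorII number → Pre_jumpFloorII number → Spec_jumpFloorII number (jumpFloorII number)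

-- ===== LEMMAS AND PROOFS =====

-- The table A has built after iterations 3..n (n ≥ 2): [0, 2^0, 2^1, …, 2^(n-1)].
def pvTable (n : Nat) : List Int := [0] ++ (List.range n).map (fun t => (2 : Int) ^ t)

theorem pvTable_length (n : Nat) : (pvTable n).length = n + 1 := by
  simp [pvTable]

theorem pv_geo (n : Nat) : (((List.range n).map (fun t => (2 : Int) ^ t)).sum) = 2 ^ n - 1 := by
  induction n with
  | zero => simp
  | succ n ih => simp [List.range_succ, ih]; ring

-- map (i - ·) turns range(1, i) into the countdown range, i.e. its reverse.
theorem pv_map_sub (i : Int) :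
    (PySem.List.pyRange 1 i 1).map (fun j => i - j) = (PySem.List.pyRange 1 i 1).reverse := by
  rw [show (PySem.List.pyRange 1 i 1).reverse = PySem.List.pyRange (i - 1) 0 (-1) from by
        rw [PySem.List.pyRange_neg_one_eq_reverse]; norm_num]
  rw [PySem.List.pyRange_one, PySem.List.pyRange_neg_one, List.map_map]
  have : (i - 1 - 0).toNat = (i - 1).toNat := by omega
  rw [this]
  apply List.map_congr_left
  intro k _
  simp; ring

-- The inner loop of A sums xs[1:] (in reverse order).
theorem pv_inner (xs : List Int) :
    (PySem.List.pyRange 1 (xs.length : Int) 1).foldl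
      (fun tmp j => tmp + PySem.List.pyGetD xs ((xs.length : Int) - j) 0) 0
      = (xs.drop 1).sum := by
  rw [PySem.List.foldl_add (g := fun j => PySem.List.pyGetD xs ((xs.length : Int) - j) 0)]
  have h2 : (PySem.List.pyRange 1 (xs.length : Int) 1).map
      (fun j => PySem.List.pyGetD xs ((xs.length : Int) - j) 0)
      = ((PySem.List.pyRange 1 (xs.length : Int) 1).map (fun k => PySem.List.pyGetD xs k 0)).reverse := by
    rw [← List.map_reverse, ← pv_map_sub, List.map_map]
    rfl
  rw [h2, List.sum_reverse, PySem.List.map_pyGetD_pyRange' xs 0 (by norm_num)]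
  simp

-- The outer loop builds pvTable n.
theorem pv_loop (n : Nat) (h : 2 ≤ n) :
    (PySem.List.pyRange 3 ((n : Int) + 1) 1).foldl
      (fun util i =>
        let tmp := (PySem.List.pyRange 1 i 1).foldl
          (fun tmp j => tmp + PySem.List.pyGetD util (i - j) 0) 0
        util ++ [tmp + 1]) [0, 1, 2]
      = pvTable n := by
  induction n, h using Nat.le_induction with
  | base =>
      rw [show (((2 : Nat) : Int) + 1) = 3 by norm_num,
          PySem.List.pyRange_one_eq_nil (by norm_num)]
      decide
  | succ n hn ih =>
      rw [show (((n + 1 : Nat) : Int) + 1) = ((n : Int) + 1) + 1 by push_cast; ring,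
          PySem.List.pyRange_one_succ_right (by omega), List.foldl_append, ih]
      have hlen : ((pvTable n).length : Int) = (n : Int) + 1 := by
        rw [pvTable_length]; push_cast; ring
      simp only [List.foldl_cons, List.foldl_nil]
      have hinner := pv_inner (pvTable n)
      rw [hlen] at hinner
      rw [hinner]
      have hdrop : ((pvTable n).drop 1).sum = 2 ^ n - 1 := by
        simp [pvTable, pv_geo]
      rw [hdrop]
      simp [pvTable, List.range_succ]

-- ===== VERDICT (by name: the statement is the Claim_ definition above) =====
theorem jumpFloorII_spec : Claim_equal_jumpFloorII := by
  intro number _ hpre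
  unfold Pre_jumpFloorII at hpre
  unfold Spec_jumpFloorII jumpFloorII jumpFloorII_alt
  rcases lt_or_ge number 3 with h3 | h3
  · interval_cases number <;> decide
  · obtain ⟨n, rfl⟩ : ∃ n : Nat, number = (n : Int) :=
      ⟨number.toNat, (Int.toNat_of_nonneg hpre).symm⟩
    have hn : 3 ≤ n := by exact_mod_cast h3
    have h0 : ¬ ((n : Int) == 0) = true := by simp; omega
    have h1 : ¬ ((n : Int) == 1) = true := by simp; omega
    have h2 : ¬ ((n : Int) == 2) = true := by simp; omega
    simp only [h0, h1, h2, if_false, Bool.false_eq_true]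
    rw [pv_loop n (by omega)]
    have hsplit : pvTable n = ([0] ++ (List.range (n - 1)).map (fun t => (2 : Int) ^ t)) ++ [2 ^ (n - 1)] := by
      conv_lhs => rw [pvTable, show n = (n - 1) + 1 by omega]
      simp [List.range_succ]
    rw [hsplit, PySem.List.pyGetD_neg_one_append_singleton]
    have ht : ((n : Int) - 1).toNat = n - 1 := by omega
    rw [ht, Nat.one_shiftLeft]
    push_cast
    ring
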